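-- pv_equiv track=rewrite | github.com/BrightBoost-Tech/options-trading-companion | scripts/run_signed_task.py | sanitize_snippet
-- ===== SOURCE A (Python) =====
-- MAX_SNIPPET_LENGTH = 300
--
-- def sanitize_snippet(s: str) -> str:
--     """
--     Truncate and escape snippet for safe display in markdown tables and logs.
--
--     Args:
--         s: Raw snippet string
--
--     Returns:
--         Sanitized string safe for markdown tables
--     """
--     if not s:
--         return ""
--
--     # Truncate first
--     truncated = s[:MAX_SNIPPET_LENGTH]
--     if len(s) > MAX_SNIPPET_LENGTH:
--         truncated += "..."
--
--     # Escape characters that break markdown tables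
--     sanitized = truncated.replace("|", "\\|").replace("\n", " ").replace("\r", " ")
--
--     # Remove any control characters
--     sanitized = "".join(c if c.isprintable() or c == " " else " " for c in sanitized)
--
--     return sanitized
-- ===== SOURCE B (Python) =====
-- MAX_SNIPPET_LENGTH = 300
--
-- def sanitize_snippet(s: str) -> str:
--     if not s:
--         return ""
--     truncated = s[:MAX_SNIPPET_LENGTH]
--     if len(s) > MAX_SNIPPET_LENGTH:
--         truncated += "..."
--     # single pass: escape '|', blank out newlines/CR/non-printables
--     out = []
--     for c in truncated:
--         if c == "|":
--             out.append("\\|")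
--         elif c == "\n" or c == "\r" or not c.isprintable():
--             out.append(" ")
--         else:
--             out.append(c)
--     return "".join(out)
-- ===== Notes on version B (the rewrite author's own statement) =====
-- stated objective: simpler
-- what changed: Replaces the three chained .replace() scans plus a filtering join-comprehension with one single pass over the truncated string that emits the escape/replacement for each character directly.
import Mathlib
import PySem

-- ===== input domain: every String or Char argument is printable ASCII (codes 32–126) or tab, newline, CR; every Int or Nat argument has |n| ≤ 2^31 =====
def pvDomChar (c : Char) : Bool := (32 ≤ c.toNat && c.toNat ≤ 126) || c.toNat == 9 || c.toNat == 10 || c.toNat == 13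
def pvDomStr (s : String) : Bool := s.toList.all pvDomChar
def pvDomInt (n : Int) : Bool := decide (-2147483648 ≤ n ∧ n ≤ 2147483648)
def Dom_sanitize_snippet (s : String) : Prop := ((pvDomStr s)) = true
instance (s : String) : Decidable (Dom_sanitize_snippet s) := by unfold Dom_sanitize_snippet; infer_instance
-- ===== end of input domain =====

-- B fuses A's three .replace() scans and filtering comprehension into one per-character pass (objective: simpler).


-- hand port of str.isprintable for a single char; exact on ASCII (printable = codes 32..126)
def pyIsPrintableChar (c : Char) : Bool := 32 ≤ c.toNat && c.toNat ≤ 126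

-- ===== PORT A =====
def sanitize_snippet (s : String) : String :=
  if s.toList = [] then "" else
  let cs := s.toList
  let truncated := PySem.List.slice cs none (some (300 : Int))
  let truncated := if 300 < cs.length then truncated ++ "...".toList else truncated
  let sanitized :=
    PySem.Chars.replace
      (PySem.Chars.replace (PySem.Chars.replace truncated ['|'] ['\\', '|']) ['\n'] [' '])
      ['\r'] [' ']
  let sanitized := PySem.Chars.join []
    (sanitized.map (fun c => if pyIsPrintableChar c || c = ' ' then [c] else [' ']))
  String.ofList sanitized

-- ===== PORT B =====
-- what B appends for one character of the truncated string
def sanitizeChar (c : Char) : List Char :=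
  if c = '|' then ['\\', '|']
  else if c = '\n' || c = '\r' || !pyIsPrintableChar c then [' ']
  else [c]

def sanitize_snippet_alt (s : String) : String :=
  if s.toList = [] then "" else
  let cs := s.toList
  let truncated := PySem.List.slice cs none (some (300 : Int))
  let truncated := if 300 < cs.length then truncated ++ "...".toList else truncated
  let out : List (List Char) := truncated.foldl (fun acc c => acc ++ [sanitizeChar c]) []
  String.ofList (PySem.Chars.join [] out)

-- ===== PRECONDITION & SPEC =====
def Spec_sanitize_snippet (s : String) (out : String) : Prop := out = sanitize_snippet_alt s
instance (s : String) (out : String) : Decidable (Spec_sanitize_snippet s out) := by unfold Spec_sanitize_snippet; infer_instance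

-- ===== CLAIM (what is proved, stated in full; the proofs are below) =====
def Claim_equal_sanitize_snippet : Prop := ∀ (s : String), Dom_sanitize_snippet s → Spec_sanitize_snippet s (sanitize_snippet s)

-- ===== LEMMAS AND PROOFS =====

-- single-character replace is a flatMap
theorem replace_go_single (a : Char) (new : List Char) (l : List Char) :
    ∀ (fuel : Nat) (acc : List Char), l.length ≤ fuel →
      PySem.Chars.replace.go [a] new fuel l acc
        = acc.reverse ++ l.flatMap (fun c => if c = a then new else [c]) := by
  induction l with
  | nil =>
    intro fuel acc _
    cases fuel <;> simp [PySem.Chars.replace.go]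
  | cons c t ih =>
    intro fuel acc h
    cases fuel with
    | zero => simp at h
    | succ n =>
      have hpre : List.isPrefixOf [a] (c :: t) = (a == c) := by
        simp [List.isPrefixOf]
      by_cases hac : a = c
      · subst hac
        have hstep : PySem.Chars.replace.go [a] new (n + 1) (a :: t) acc
            = PySem.Chars.replace.go [a] new n t (new.reverse ++ acc) := by
          simp [PySem.Chars.replace.go, List.isPrefixOf]
        rw [hstep, ih n _ (by simpa using h)]
        simp [List.flatMap_cons]
      · have hstep : PySem.Chars.replace.go [a] new (n + 1) (c :: t) acc
            = PySem.Chars.replace.go [a] new n t (c :: acc) := by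
          simp [PySem.Chars.replace.go, List.isPrefixOf, hac]
        rw [hstep, ih n _ (by simpa using h)]
        simp [List.flatMap_cons, Ne.symm hac]

theorem replace_single (a : Char) (new : List Char) (l : List Char) :
    PySem.Chars.replace l [a] new = l.flatMap (fun c => if c = a then new else [c]) := by
  simp [PySem.Chars.replace, replace_go_single a new l l.length [] le_rfl]

theorem join_nil_eq_flatten (parts : List (List Char)) :
    PySem.Chars.join [] parts = parts.flatten := by
  induction parts with
  | nil => rfl
  | cons p ps ih =>
    simp [PySem.Chars.join, List.intercalate] at ih ⊢
    cases ps <;> simp_all [List.intercalate]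

-- per-character agreement of A's chain with B's sanitizeChar, on domain characters
theorem chain_eq_sanitizeChar (c : Char) (h : pvDomChar c = true) :
    List.flatMap
        (fun x =>
          List.flatMap
            (fun x =>
              List.flatMap (fun c => if (pyIsPrintableChar c || decide (c = ' ')) = true then [c] else [' '])
                (if x = '\r' then [' '] else [x]))
            (if x = '\n' then [' '] else [x]))
        (if c = '|' then ['\\', '|'] else [c])
      = sanitizeChar c := by
  by_cases h1 : c = '|'
  · subst h1; decide
  · by_cases h2 : c = '\n'
    · subst h2; decide
    · by_cases h3 : c = '\r'
      · subst h3; decide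
      · by_cases hp : pyIsPrintableChar c = true
        · simp [h1, h2, h3, hp, sanitizeChar]
        · have hsp : c ≠ ' ' := by
            intro hc; subst hc; exact hp (by decide)
          simp [h1, h2, h3, hp, hsp, sanitizeChar]

theorem flatMap_congr_mem {α β : Type} (l : List α) (f g : α → List β)
    (h : ∀ x ∈ l, f x = g x) : l.flatMap f = l.flatMap g := by
  induction l with
  | nil => rfl
  | cons a t ih =>
    simp only [List.flatMap_cons, h a (by simp)]
    rw [ih (fun x hx => h x (by simp [hx]))]

theorem all_truncated (cs : List Char) (h : cs.all pvDomChar = true) :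
    ∀ c ∈ (if 300 < cs.length then PySem.List.slice cs none (some (300 : Int)) ++ "...".toList
           else PySem.List.slice cs none (some (300 : Int))), pvDomChar c = true := by
  intro c hc
  have hmem : c ∈ cs ∨ c ∈ "...".toList := by
    split at hc
    · rcases List.mem_append.mp hc with h1 | h1
      · exact Or.inl (PySem.List.mem_of_mem_slice _ _ _ h1)
      · exact Or.inr h1
    · exact Or.inl (PySem.List.mem_of_mem_slice _ _ _ hc)
  rcases hmem with h1 | h1
  · exact List.all_eq_true.mp h c h1
  · simp at h1; subst h1; decide

-- ===== VERDICT (by name: the statement is the Claim_ definition above) =====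
theorem sanitize_snippet_spec : Claim_equal_sanitize_snippet := by
  intro s hdom
  unfold Spec_sanitize_snippet sanitize_snippet sanitize_snippet_alt
  by_cases hnil : s.toList = []
  · simp [hnil]
  · simp only [hnil, if_false]
    set t := (if 300 < s.toList.length then
        PySem.List.slice s.toList none (some (300 : Int)) ++ "...".toList
      else PySem.List.slice s.toList none (some (300 : Int))) with ht
    have hall : ∀ c ∈ t, pvDomChar c = true := by
      rw [ht]; exact all_truncated s.toList hdom
    congr 1
    rw [PySem.List.foldl_append_eq_flatMap]
    rw [replace_single, replace_single, replace_single]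
    have hmap : ∀ (l : List Char) (g : Char → List Char),
        PySem.Chars.join [] (l.map g) = l.flatMap g := by
      intro l g
      rw [join_nil_eq_flatten, ← List.flatMap_def]
    simp only [List.nil_append]
    have hsing : List.flatMap (fun c => [sanitizeChar c]) t = t.map sanitizeChar := by
      induction t with
      | nil => rfl
      | cons a l ih => simp [List.flatMap_cons, ih]
    rw [hsing, hmap, hmap]
    rw [List.flatMap_assoc, List.flatMap_assoc, List.flatMap_assoc]
    refine flatMap_congr_mem t _ _ (fun c hc => ?_)
    exact chain_eq_sanitizeChar c (hall c hc)
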